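-- pv_equiv track=rewrite | github.com/VictorSallesBz/Worth-List | Worth List.py | numbers_combinations
-- ===== SOURCE A (Python) =====
-- from itertools import combinations, permutations
--
-- def numbers_combinations(numbers, max_password_length):
--     combined_numbers = []
--     for x in range(len(numbers) + 1):
--         for comb in combinations(numbers, x):
--             tmp = ''.join(comb)
--             if len(tmp) <= max_password_length:
--                 combined_numbers.append(tmp)
--
--     combined_numbers = set(combined_numbers)
--     # Combinations generates an empty element
--     try:
--         combined_numbers.remove('')
--     except:
--         pass
--     return combined_numbers
-- ===== SOURCE B (Python) =====
-- def numbers_combinations(numbers, max_password_length):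
--     # Pascal-style DP: rows[k] holds the joins of all size-k combinations of the
--     # input (in itertools order) that fit the length bound, built in one
--     # right-to-left pass; over-long joins are pruned early (a superset's join is
--     # never shorter), so no over-long string is ever built.
--     base = [''] if 0 <= max_password_length else []
--     rows = [base]
--     for x in reversed(numbers):
--         rows = [base] + [[s for s in (x + c for c in prev)
--                           if len(s) <= max_password_length] + cur
--                          for prev, cur in zip(rows, rows[1:] + [[]])]
--     out = set()
--     for row in rows:
--         out.update(row)
--     out.discard('')
--     return out
-- ===== Notes on version B (the rewrite author's own statement) =====
-- stated objective: faster
-- what changed: Replaces the size-loop over itertools.combinations (each subset joined from scratch) with a one-pass right-to-left Pascal-style DP whose rows hold the size-k joins, each join built by a single concatenation from its parent and over-long joins pruned as soon as they appear (a superset's join is never shorter).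
import Mathlib
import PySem

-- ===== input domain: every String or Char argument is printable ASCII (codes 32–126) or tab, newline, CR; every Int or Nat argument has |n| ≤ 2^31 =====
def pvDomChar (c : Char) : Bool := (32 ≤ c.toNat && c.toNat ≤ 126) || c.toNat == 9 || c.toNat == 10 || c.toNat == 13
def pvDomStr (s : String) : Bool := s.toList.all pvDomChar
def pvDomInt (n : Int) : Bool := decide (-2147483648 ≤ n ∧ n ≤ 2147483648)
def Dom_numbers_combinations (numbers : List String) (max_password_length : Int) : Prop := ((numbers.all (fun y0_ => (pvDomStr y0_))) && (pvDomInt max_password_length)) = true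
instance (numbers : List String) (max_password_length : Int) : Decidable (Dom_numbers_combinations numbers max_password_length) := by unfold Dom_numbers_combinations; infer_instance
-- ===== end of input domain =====

-- B replaces the size-indexed itertools.combinations loop by a one-pass Pascal-style DP over
-- the input that builds each subset's join from its parent and prunes over-long joins early
-- (a superset's join is never shorter), intending to avoid building over-long strings.

-- ===== PORT A =====
-- literal transliteration of A: size loop, itertools.combinations (= PySem.List.combinations,
-- CPython's order), ''.join, conditional append; then set(...) and try: remove('') (= discard).
def numbers_combinations (numbers : List String) (max_password_length : Int) : List String :=
  let combined_numbers : List String :=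
    (List.range (numbers.length + 1)).foldl (fun acc x =>
      (PySem.List.combinations numbers x).foldl (fun acc comb =>
        let tmp := PySem.Str.join "" comb
        if (PySem.Str.len tmp : Int) ≤ max_password_length then acc ++ [tmp] else acc) acc) []
  PySem.Set.discard (PySem.Set.ofList combined_numbers) ""

-- ===== PORT B =====
-- literal transliteration of Source B: rows DP over reversed(numbers) (zip of rows with its tail),
-- `x + c` is String append; then the set is built row by row (out.update(row)) and '' discarded.
def numbers_combinations_alt (numbers : List String) (max_password_length : Int) : List String :=
  let base : List String := if (0 : Int) ≤ max_password_length then [""] else []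
  let rows : List (List String) :=
    numbers.reverse.foldl (fun rows x =>
      base :: (rows.zip (rows.tail ++ [[]])).map (fun pc =>
        ((pc.1.map (fun c => x ++ c)).filter
          (fun s => (PySem.Str.len s : Int) ≤ max_password_length)) ++ pc.2)) [base]
  let out : PySem.Set String :=
    rows.foldl (fun out row => PySem.Set.update out row) PySem.Set.empty
  PySem.Set.discard out ""

-- ===== PRECONDITION & SPEC =====
def Spec_numbers_combinations (numbers : List String) (max_password_length : Int) (out : List String) : Prop := out = numbers_combinations_alt numbers max_password_length
instance (numbers : List String) (max_password_length : Int) (out : List String) : Decidable (Spec_numbers_combinations numbers max_password_length out) := by unfold Spec_numbers_combinations; infer_instance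

-- ===== CLAIM (what is proved, stated in full; the proofs are below) =====
def Claim_equal_numbers_combinations : Prop := ∀ (numbers : List String) (max_password_length : Int), Dom_numbers_combinations numbers max_password_length → Spec_numbers_combinations numbers max_password_length (numbers_combinations numbers max_password_length)

-- ===== LEMMAS AND PROOFS =====

def pvFits (m : Int) (s : String) : Bool := decide ((PySem.Str.len s : Int) ≤ m)

def pvRows (m : Int) (l : List String) : List (List String) :=
  (List.range (l.length + 1)).map (fun k =>
    ((PySem.List.combinations l k).map (PySem.Str.join "")).filter (pvFits m))

theorem pv_chars_join_nil_cons (a : List Char) (r : List (List Char)) :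
    PySem.Chars.join [] (a :: r) = a ++ PySem.Chars.join [] r := by
  cases r with
  | nil => simp [PySem.Chars.join_singleton, PySem.Chars.join_nil]
  | cons b t => simp [PySem.Chars.join_cons_cons]

theorem pv_join_cons (x : String) (cs : List String) :
    PySem.Str.join "" (x :: cs) = x ++ PySem.Str.join "" cs := by
  apply String.toList_inj.mp
  simp [pv_chars_join_nil_cons]

theorem pv_fits_append (m : Int) (x c : String) (h : pvFits m (x ++ c) = true) :
    pvFits m c = true := by
  simp only [pvFits, decide_eq_true_eq, PySem.Str.len_eq] at *
  simp only [String.toList_append, List.length_append] at h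
  omega

theorem pv_filter_map_filter {α β : Type} (p : β → Bool) (q : α → Bool) (f : α → β)
    (h : ∀ a, p (f a) = true → q a = true) (l : List α) :
    ((l.filter q).map f).filter p = (l.map f).filter p := by
  induction l with
  | nil => simp
  | cons a t ih =>
    by_cases hq : q a = true
    · simp [List.filter_cons, hq, ih]
    · have hp : p (f a) = false := by
        cases hpa : p (f a) with
        | false => rfl
        | true => exact absurd (h a hpa) (by simpa using hq)
      simp [hq, hp, ih]

theorem pv_rows_step (m : Int) (x : String) (xs : List String) :
    ((if (0 : Int) ≤ m then [""] else []) ::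
      ((pvRows m xs).zip ((pvRows m xs).tail ++ [[]])).map (fun pc =>
        ((pc.1.map (fun c => x ++ c)).filter
          (fun s => (PySem.Str.len s : Int) ≤ m)) ++ pc.2))
    = pvRows m (x :: xs) := by
  have hlen : (pvRows m xs).length = xs.length + 1 := by simp [pvRows]
  apply List.ext_getElem
  · simp [pvRows]
  · intro i hi hi'
    match i with
    | 0 =>
      have hje : PySem.Str.join "" ([] : List String) = "" := by
        apply String.toList_inj.mp; simp
      by_cases h0 : (0 : Int) ≤ m <;>
        simp [pvRows, PySem.List.combinations_zero, hje, List.filter, pvFits,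
          PySem.Str.len_eq, h0]
    | j + 1 =>
      have hj : j < xs.length + 1 := by
        simp [pvRows] at hi'; omega
      have hzip : ((pvRows m xs).zip ((pvRows m xs).tail ++ [[]])).length = xs.length + 1 := by
        simp [hlen]
      simp only [List.getElem_cons_succ, List.getElem_map, List.getElem_zip]
      have hR : ∀ (k : ℕ) (hk : k < xs.length + 1),
          (pvRows m xs)[k]'(by simp [hlen]; omega) =
            ((PySem.List.combinations xs k).map (PySem.Str.join "")).filter (pvFits m) := by
        intro k hk; simp [pvRows]
      have hR' : (pvRows m (x :: xs))[j + 1]'hi' =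
          ((PySem.List.combinations (x :: xs) (j + 1)).map (PySem.Str.join "")).filter (pvFits m) := by
        simp [pvRows]
      rw [hR j hj, hR']
      rw [PySem.List.combinations_cons_succ, List.map_append, List.filter_append]
      have h1 : List.filter (fun s => decide (PySem.Str.len s ≤ m))
            (List.map (fun c => x ++ c)
              (((PySem.List.combinations xs j).map (PySem.Str.join "")).filter (pvFits m))) =
          List.filter (pvFits m)
            (List.map (PySem.Str.join "") (List.map (List.cons x) (PySem.List.combinations xs j))) := by
        show List.filter (pvFits m) (List.map (fun c => x ++ c)
            (List.filter (pvFits m) (List.map (PySem.Str.join "") (PySem.List.combinations xs j)))) = _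
        rw [pv_filter_map_filter (pvFits m) (pvFits m) (fun c => x ++ c) (pv_fits_append m x)]
        congr 1
        simp only [List.map_map]
        exact List.map_congr_left (fun c _ => (pv_join_cons x c).symm)
      rw [h1]
      congr 1
      by_cases hlt : j < xs.length
      · rw [List.getElem_append_left (by simp [hlen]; omega)]
        rw [List.getElem_tail]
        exact hR (j + 1) (by omega)
      · have hje : j = xs.length := by omega
        subst hje
        rw [List.getElem_append_right (by simp [hlen])]
        have hnil : PySem.List.combinations xs (xs.length + 1) = [] :=
          PySem.List.combinations_eq_nil_of_length_lt xs (by omega)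
        simp [hlen, hnil]

theorem pv_rows_eq (m : Int) (l : List String) :
    l.reverse.foldl (fun rows x =>
      (if (0 : Int) ≤ m then [""] else []) ::
      (rows.zip (rows.tail ++ [[]])).map (fun pc =>
        ((pc.1.map (fun c => x ++ c)).filter
          (fun s => (PySem.Str.len s : Int) ≤ m)) ++ pc.2))
      [if (0 : Int) ≤ m then [""] else []]
    = pvRows m l := by
  induction l with
  | nil =>
    have hje : PySem.Str.join "" ([] : List String) = "" := by
      apply String.toList_inj.mp; simp
    by_cases h0 : (0 : Int) ≤ m <;>
      simp [pvRows, PySem.List.combinations_zero, hje, List.filter, pvFits,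
        PySem.Str.len_eq, h0]
  | cons x xs ih =>
    rw [List.reverse_cons, List.foldl_append, List.foldl_cons, List.foldl_nil, ih]
    exact pv_rows_step m x xs

theorem pv_a_list (numbers : List String) (m : Int) :
    (List.range (numbers.length + 1)).foldl (fun acc x =>
      (PySem.List.combinations numbers x).foldl (fun acc comb =>
        let tmp := PySem.Str.join "" comb
        if (PySem.Str.len tmp : Int) ≤ m then acc ++ [tmp] else acc) acc) []
    = (pvRows m numbers).flatten := by
  have hone : ∀ (acc : List String) (k : ℕ),
      (PySem.List.combinations numbers k).foldl (fun acc comb =>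
        let tmp := PySem.Str.join "" comb
        if (PySem.Str.len tmp : Int) ≤ m then acc ++ [tmp] else acc) acc
      = acc ++ ((PySem.List.combinations numbers k).map (PySem.Str.join "")).filter (pvFits m) := by
    intro acc k
    show (PySem.List.combinations numbers k).foldl (fun acc comb =>
        if (PySem.Str.len (PySem.Str.join "" comb) : Int) ≤ m
        then acc ++ [PySem.Str.join "" comb] else acc) acc = _
    rw [PySem.List.foldl_append_ite (p := fun comb => (PySem.Str.len (PySem.Str.join "" comb) : Int) ≤ m)
      (f := PySem.Str.join "")]
    rw [List.filter_map]
    rfl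
  have houter := PySem.List.foldl_congr_mem
    (l := List.range (numbers.length + 1)) (init := ([] : List String))
    (f := fun acc x => (PySem.List.combinations numbers x).foldl (fun acc comb =>
        let tmp := PySem.Str.join "" comb
        if (PySem.Str.len tmp : Int) ≤ m then acc ++ [tmp] else acc) acc)
    (g := fun acc k =>
      acc ++ ((PySem.List.combinations numbers k).map (PySem.Str.join "")).filter (pvFits m))
    (fun acc k _ => hone acc k)
  rw [houter, PySem.List.foldl_append_eq_flatMap
    (g := fun k => ((PySem.List.combinations numbers k).map (PySem.Str.join "")).filter (pvFits m))]
  simp [pvRows, List.flatMap_def]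

-- a fold of Set.update over the rows is one update by the flattened rows
theorem pv_fold_update (rows : List (List String)) (s : PySem.Set String) :
    rows.foldl (fun out row => PySem.Set.update out row) s = PySem.Set.update s rows.flatten := by
  induction rows generalizing s with
  | nil => simp [PySem.Set.update]
  | cons r t ih =>
    rw [List.foldl_cons, ih, List.flatten_cons]
    simp [PySem.Set.update, List.foldl_append]

-- ===== VERDICT (by name: the statement is the Claim_ definition above) =====
theorem numbers_combinations_spec : Claim_equal_numbers_combinations := by
  intro numbers m _
  simp only [Spec_numbers_combinations, numbers_combinations, numbers_combinations_alt]
  rw [pv_a_list, pv_rows_eq, pv_fold_update]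
  rfl
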